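-- pv_equiv track=rewrite | github.com/t-sin/lisc | lisc.py | l_read_symbol
-- ===== SOURCE A (Python) =====
-- def l_read_symbol(s):
--     name = []
--     i = 0
--     while True:
--         if i >= len(s):
--             return (''.join(name), len(s))
--         c = s[i]
--         if c == ' ' or c == ')':
--             return (''.join(name), i)
--         else:
--             name.append(c)
--         i += 1
-- ===== SOURCE B (Python) =====
-- def l_read_symbol(s):
--     p1 = s.find(' ')
--     p2 = s.find(')')
--     cands = [p for p in (p1, p2) if p != -1]
--     i = min(cands) if cands else len(s)
--     return (s[:i], i)
-- ===== Notes on version B (the rewrite author's own statement) =====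
-- stated objective: simpler
-- what changed: Replaced the char-by-char scan-and-accumulate loop with locate-then-slice: find the first ' ' and ')' positions with str.find, take the minimum present position (or len(s)), and slice.
import Mathlib
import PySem

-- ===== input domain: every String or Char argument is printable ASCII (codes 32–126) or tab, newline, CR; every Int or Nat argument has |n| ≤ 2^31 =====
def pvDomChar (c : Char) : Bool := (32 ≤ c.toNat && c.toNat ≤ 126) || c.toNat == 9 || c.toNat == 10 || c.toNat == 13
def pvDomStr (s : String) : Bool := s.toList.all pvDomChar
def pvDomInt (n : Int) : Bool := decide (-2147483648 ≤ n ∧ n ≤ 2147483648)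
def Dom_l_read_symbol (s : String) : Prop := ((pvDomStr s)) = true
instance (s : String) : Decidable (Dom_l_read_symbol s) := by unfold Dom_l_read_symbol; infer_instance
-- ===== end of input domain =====

-- B replaces A's char-by-char scan-and-accumulate loop with locate-then-slice via str.find (objective: simpler).

-- ===== PORT A =====
-- literal port of A's while-loop: index i over s, accumulator name
def lrsGo (s : List Char) (name : List Char) (i : Nat) : String × Int :=
  if h : s.length ≤ i then (String.ofList name, (s.length : Int))
  else
    let c := s[i]'(by omega)
    if c = ' ' ∨ c = ')' then (String.ofList name, (i : Int))
    else lrsGo s (name ++ [c]) (i + 1)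
termination_by s.length - i

def l_read_symbol (s : String) : String × Int := lrsGo s.toList [] 0

-- ===== PORT B =====
def l_read_symbol_alt (s : String) : String × Int :=
  let p1 := PySem.Str.find s " "
  let p2 := PySem.Str.find s ")"
  let cands := ([p1, p2] : List Int).filter (fun p => p ≠ -1)
  let i : Int :=
    match PySem.List.min? cands (fun x => x) with
    | some m => m
    | none => PySem.Str.len s
  (String.ofList (PySem.List.slice s.toList none (some i)), i)

-- ===== PRECONDITION & SPEC =====
def Spec_l_read_symbol (s : String) (out : String × Int) : Prop := out = l_read_symbol_alt s
instance (s : String) (out : String × Int) : Decidable (Spec_l_read_symbol s out) := by unfold Spec_l_read_symbol; infer_instance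

-- ===== CLAIM (what is proved, stated in full; the proofs are below) =====
def Claim_equal_l_read_symbol : Prop := ∀ (s : String), Dom_l_read_symbol s → Spec_l_read_symbol s (l_read_symbol s)

-- ===== LEMMAS AND PROOFS =====

-- predicate "c is a symbol char" (not a delimiter)
def pSym (c : Char) : Bool := !(c == ' ' || c == ')')

theorem go_nonneg_or (d : Char) : ∀ (cs : List Char) (i : Nat),
    PySem.Chars.find.go [d] cs i = -1 ∨ (i : Int) ≤ PySem.Chars.find.go [d] cs i := by
  intro cs
  induction cs with
  | nil => intro i; rw [PySem.Chars.find.go]; simp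
  | cons c cs ih =>
      intro i
      rw [PySem.Chars.find.go]
      split_ifs with h
      · right; simp
      · rcases ih (i + 1) with h1 | h1
        · left; exact h1
        · right; omega

theorem go_shift (d : Char) : ∀ (cs : List Char) (i : Nat),
    PySem.Chars.find.go [d] cs i =
      if PySem.Chars.find.go [d] cs 0 = -1 then -1 else PySem.Chars.find.go [d] cs 0 + i := by
  intro cs
  induction cs with
  | nil => intro i; rw [PySem.Chars.find.go, PySem.Chars.find.go]; simp
  | cons c cs ih =>
      intro i
      rw [PySem.Chars.find.go]
      conv_rhs => rw [PySem.Chars.find.go]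
      by_cases h : [d].isPrefixOf (c :: cs) = true
      · simp only [h, if_true]
        norm_num
      · simp only [h, if_false]
        rw [ih (i + 1), ih 1]
        rcases go_nonneg_or d cs 0 with h1 | h1
        · simp [h1]
        · split_ifs with h2 h3 <;> omega

theorem find_singleton_cons (c d : Char) (cs : List Char) :
    PySem.Chars.find (c :: cs) [d] =
      if c = d then 0
      else if PySem.Chars.find cs [d] = -1 then -1 else PySem.Chars.find cs [d] + 1 := by
  show PySem.Chars.find.go [d] (c :: cs) 0 = _
  rw [PySem.Chars.find.go]
  have hpre : [d].isPrefixOf (c :: cs) = (d == c) := by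
    simp [List.isPrefixOf]
  rw [hpre]
  by_cases h : c = d
  · subst h; simp
  · have hbc : (d == c) = false := by
      simp [(Ne.symm h)]
    rw [hbc]
    simp only [Bool.false_eq_true, if_false, if_neg h]
    rw [go_shift d cs 1]
    norm_num
    rfl

theorem find_cons_eq (c d : Char) (cs : List Char) (h : c = d) :
    PySem.Chars.find (c :: cs) [d] = 0 := by
  rw [find_singleton_cons, if_pos h]

theorem find_cons_ne (c d : Char) (cs : List Char) (h : c ≠ d) :
    PySem.Chars.find (c :: cs) [d] =
      if PySem.Chars.find cs [d] = -1 then -1 else PySem.Chars.find cs [d] + 1 := by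
  rw [find_singleton_cons, if_neg h]

theorem find_singleton_nil (d : Char) : PySem.Chars.find [] [d] = -1 := by
  show PySem.Chars.find.go [d] [] 0 = -1
  rw [PySem.Chars.find.go]; simp

-- the index B computes equals the length of the maximal symbol prefix
theorem computeI (cs : List Char) :
    (match PySem.List.min?
        (([PySem.Chars.find cs [' '], PySem.Chars.find cs [')']] : List Int).filter (fun p => p ≠ -1))
        (fun x => x) with
      | some m => m
      | none => (cs.length : Int))
      = ((cs.takeWhile pSym).length : Int) := by
  induction cs with
  | nil =>
      simp only [find_singleton_nil]
      have hf : (([(-1 : Int), -1]).filter (fun p => decide (p ≠ -1))) = [] := by decide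
      rw [hf]
      rw [show PySem.List.min? ([] : List Int) (fun x => x) = none from by
        rw [PySem.List.min?_eq_none_iff]]
      simp
  | cons c cs ih =>
      by_cases h1 : c = ' '
      · subst h1
        rw [find_cons_eq _ _ _ rfl, find_cons_ne _ _ _ (by decide : (' ' : Char) ≠ ')')]
        have htw : List.takeWhile pSym (' ' :: cs) = [] := by
          simp [List.takeWhile, show pSym ' ' = false from by decide]
        rw [htw]
        by_cases hb : PySem.Chars.find cs [')'] = -1
        · rw [if_pos hb]
          simp [List.filter, PySem.List.min?_id_cons]
        · rw [if_neg hb]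
          have hpos : (0 : Int) ≤ PySem.Chars.find cs [')'] := by
            have := PySem.Chars.neg_one_le_find cs [')']
            omega
          have hne : PySem.Chars.find cs [')'] + 1 ≠ -1 := by omega
          simp [List.filter, hne, PySem.List.min?_id_cons]
          omega
      · by_cases h2 : c = ')'
        · subst h2
          rw [find_cons_eq _ _ _ rfl, find_cons_ne _ _ _ (by decide : ((')') : Char) ≠ ' ')]
          have htw : List.takeWhile pSym (')' :: cs) = [] := by
            simp [List.takeWhile, show pSym ')' = false from by decide]
          rw [htw]
          by_cases ha : PySem.Chars.find cs [' '] = -1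
          · rw [if_pos ha]
            simp [List.filter, PySem.List.min?_id_cons]
          · rw [if_neg ha]
            have hpos : (0 : Int) ≤ PySem.Chars.find cs [' '] := by
              have := PySem.Chars.neg_one_le_find cs [' ']
              omega
            have hne : PySem.Chars.find cs [' '] + 1 ≠ -1 := by omega
            simp [List.filter, hne, PySem.List.min?_id_cons]
            omega
        · rw [find_cons_ne _ _ _ h1, find_cons_ne _ _ _ h2]
          have hp : pSym c = true := by simp [pSym, h1, h2]
          have htw : List.takeWhile pSym (c :: cs) = c :: List.takeWhile pSym cs := by
            simp [List.takeWhile, hp]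
          rw [htw]
          by_cases ha : PySem.Chars.find cs [' '] = -1 <;>
          by_cases hb : PySem.Chars.find cs [')'] = -1
          · rw [if_pos ha, if_pos hb]
            simp only [ha, hb] at ih
            have hf : (([(-1 : Int), -1]).filter (fun p => decide (p ≠ -1))) = [] := by decide
            rw [hf]
            rw [hf] at ih
            rw [show PySem.List.min? ([] : List Int) (fun x => x) = none from by
              rw [PySem.List.min?_eq_none_iff]] at ih ⊢
            simp at ih ⊢
            omega
          · rw [if_pos ha, if_neg hb]
            have hposb : (0 : Int) ≤ PySem.Chars.find cs [')'] := by
              have := PySem.Chars.neg_one_le_find cs [')']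
              omega
            have hneb : PySem.Chars.find cs [')'] + 1 ≠ -1 := by omega
            simp only [ha] at ih
            simp [List.filter, hb, PySem.List.min?_id_cons] at ih
            simp [List.filter, hneb, PySem.List.min?_id_cons]
            omega
          · rw [if_neg ha, if_pos hb]
            have hposa : (0 : Int) ≤ PySem.Chars.find cs [' '] := by
              have := PySem.Chars.neg_one_le_find cs [' ']
              omega
            have hnea : PySem.Chars.find cs [' '] + 1 ≠ -1 := by omega
            simp only [hb] at ih
            simp [List.filter, ha, PySem.List.min?_id_cons] at ih
            simp [List.filter, hnea, PySem.List.min?_id_cons]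
            omega
          · rw [if_neg ha, if_neg hb]
            have hposa : (0 : Int) ≤ PySem.Chars.find cs [' '] := by
              have := PySem.Chars.neg_one_le_find cs [' ']
              omega
            have hposb : (0 : Int) ≤ PySem.Chars.find cs [')'] := by
              have := PySem.Chars.neg_one_le_find cs [')']
              omega
            have hnea : PySem.Chars.find cs [' '] + 1 ≠ -1 := by omega
            have hneb : PySem.Chars.find cs [')'] + 1 ≠ -1 := by omega
            simp [List.filter, ha, hb, PySem.List.min?_id_cons] at ih
            simp [List.filter, hnea, hneb, PySem.List.min?_id_cons]
            omega

theorem take_takeWhile (p : Char → Bool) : ∀ (cs : List Char),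
    cs.take (cs.takeWhile p).length = cs.takeWhile p := by
  intro cs
  induction cs with
  | nil => rfl
  | cons c cs ih =>
      by_cases h : p c
      · simp [List.takeWhile, h, ih]
      · simp [List.takeWhile, h]

theorem lrsGo_eq : ∀ (n : Nat) (cs name : List Char) (i : Nat), cs.length - i = n → i ≤ cs.length →
    lrsGo cs name i =
      (String.ofList (name ++ (cs.drop i).takeWhile pSym),
       (i : Int) + (((cs.drop i).takeWhile pSym).length : Int)) := by
  intro n
  induction n with
  | zero =>
      intro cs name i hn hle
      have hi : i = cs.length := by omega
      rw [lrsGo]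
      simp [hi]
  | succ n ih =>
      intro cs name i hn hle
      have hlt : i < cs.length := by omega
      have hdrop : cs.drop i = cs[i]'hlt :: cs.drop (i + 1) := by
        rw [List.drop_eq_getElem_cons hlt]
      rw [lrsGo]
      rw [dif_neg (by omega)]
      by_cases hc : cs[i]'hlt = ' ' ∨ cs[i]'hlt = ')'
      · rw [if_pos hc]
        have hps : pSym (cs[i]'hlt) = false := by
          rcases hc with h | h <;> simp [pSym, h]
        rw [hdrop]
        simp [List.takeWhile, hps]
      · rw [if_neg hc]
        push_neg at hc
        have hps : pSym (cs[i]'hlt) = true := by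
          simp [pSym, hc.1, hc.2]
        rw [ih cs (name ++ [cs[i]'hlt]) (i + 1) (by omega) (by omega)]
        rw [hdrop]
        simp [List.takeWhile, hps]
        omega

-- ===== VERDICT (by name: the statement is the Claim_ definition above) =====
theorem l_read_symbol_spec : Claim_equal_l_read_symbol := by
  intro s _
  unfold Spec_l_read_symbol l_read_symbol l_read_symbol_alt
  rw [lrsGo_eq (s.toList.length) s.toList [] 0 (by omega) (by omega)]
  have hsp : (" " : String).toList = [' '] := by decide
  have hpr : (")" : String).toList = [')'] := by decide
  simp only [PySem.Str.find_eq, hsp, hpr, PySem.Str.len_eq]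
  have hI := computeI s.toList
  rw [hI]
  have hk : PySem.List.slice s.toList none (some ((s.toList.takeWhile pSym).length : Int))
      = s.toList.take (s.toList.takeWhile pSym).length := by
    exact PySem.List.slice_to_natCast s.toList _
  rw [hk, take_takeWhile]
  simp
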